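-- pv_equiv track=rewrite | github.com/BrayanSolanoF/EjerciciosPython | Recursividad/formar_num_par_prueba.py | formar_par_aux
-- ===== SOURCE A (Python) =====
-- def formar_par_aux(num):
--     if num == 0:
--         return 0
--     else:
--         digit = num%10
--         if digit%2==1:
--             return formar_par_aux(num//10)
--         else:
--             return digit + 10*formar_par_aux(num//10)
-- ===== SOURCE B (Python) =====
-- def formar_par_aux(num):
--     result = 0
--     mult = 1
--     while num != 0:
--         digit = num % 10
--         num //= 10
--         if digit % 2 == 0:
--             result += digit * mult
--             mult *= 10
--     return result
-- ===== Notes on version B (the rewrite author's own statement) =====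
-- stated objective: alternative
-- what changed: Replaces the tail recursion (rebuilding via digit + 10*rec) with an explicit iterative while-loop that accumulates the result front-to-back with a running place-value multiplier.
import Mathlib
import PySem

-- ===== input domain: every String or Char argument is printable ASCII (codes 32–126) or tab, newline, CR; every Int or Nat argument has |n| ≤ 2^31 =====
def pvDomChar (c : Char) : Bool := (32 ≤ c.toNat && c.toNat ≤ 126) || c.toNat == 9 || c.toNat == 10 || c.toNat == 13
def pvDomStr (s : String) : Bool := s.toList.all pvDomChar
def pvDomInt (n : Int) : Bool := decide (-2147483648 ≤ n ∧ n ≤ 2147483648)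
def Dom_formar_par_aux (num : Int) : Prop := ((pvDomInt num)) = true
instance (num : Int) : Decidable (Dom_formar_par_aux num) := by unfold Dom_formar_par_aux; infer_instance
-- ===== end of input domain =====

-- B replaces A's tail recursion by an explicit iterative loop accumulating the result with a
-- running place-value multiplier (objective: alternative decomposition, same cost).

-- termination helper for both ports (cited by decreasing_by)
theorem pv_floordiv10_lt (num : Int) (h : ¬ num ≤ 0) :
    (PySem.Int.floordiv num 10).toNat < num.toNat := by
  rw [PySem.Int.floordiv_eq_ediv_of_pos (by omega)]
  omega

-- ===== PORT A =====
-- literal port of A's recursion; the 'num ≤ 0' guard only makes the same computation total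
-- (Python recurses forever on negatives, which Pre_ excludes; on num = 0 it is A's base case).
def formar_par_aux (num : Int) : Int :=
  if h : num ≤ 0 then 0
  else
    let digit := PySem.Int.mod num 10
    if PySem.Int.mod digit 2 = 1 then formar_par_aux (PySem.Int.floordiv num 10)
    else digit + 10 * formar_par_aux (PySem.Int.floordiv num 10)
termination_by num.toNat
decreasing_by all_goals exact pv_floordiv10_lt num h

-- ===== PORT B =====
-- B's while-loop as a tail-recursive helper over the loop state (num, result, mult);
-- the 'num ≤ 0' guard is the totality guard for the same excluded negatives.
def pvLoop_alt (num result mult : Int) : Int :=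
  if h : num ≤ 0 then result
  else
    let digit := PySem.Int.mod num 10
    let num' := PySem.Int.floordiv num 10
    if PySem.Int.mod digit 2 = 0 then pvLoop_alt num' (result + digit * mult) (mult * 10)
    else pvLoop_alt num' result mult
termination_by num.toNat
decreasing_by all_goals exact pv_floordiv10_lt num h

def formar_par_aux_alt (num : Int) : Int := pvLoop_alt num 0 1

-- ===== PRECONDITION & SPEC =====
-- Pre_ excludes negative inputs, on which the Python A recurses forever (RecursionError).
def Pre_formar_par_aux (num : Int) : Prop := 0 ≤ num
instance (num : Int) : Decidable (Pre_formar_par_aux num) := by unfold Pre_formar_par_aux; infer_instance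
def pvWitness_formar_par_aux : Int := (13579)

def Spec_formar_par_aux (num : Int) (out : Int) : Prop := out = formar_par_aux_alt num
instance (num : Int) (out : Int) : Decidable (Spec_formar_par_aux num out) := by unfold Spec_formar_par_aux; infer_instance

-- ===== CLAIM (what is proved, stated in full; the proofs are below) =====
def Claim_equal_formar_par_aux : Prop := ∀ (num : Int), Dom_formar_par_aux num → Pre_formar_par_aux num → Spec_formar_par_aux num (formar_par_aux num)

-- ===== LEMMAS AND PROOFS =====
-- loop invariant: the loop adds mult * (A's value of the remaining digits) to the accumulator
theorem pvLoop_eq (n : Nat) : ∀ (num result mult : Int), num.toNat ≤ n →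
    pvLoop_alt num result mult = result + mult * formar_par_aux num := by
  induction n with
  | zero =>
    intro num result mult hle
    have h0 : num ≤ 0 := by omega
    rw [pvLoop_alt, formar_par_aux]
    simp [h0]
  | succ n ih =>
    intro num result mult hle
    by_cases h0 : num ≤ 0
    · rw [pvLoop_alt, formar_par_aux]; simp [h0]
    · have hlt := pv_floordiv10_lt num h0
      have hrec : (PySem.Int.floordiv num 10).toNat ≤ n := by omega
      have hdiv : PySem.Int.floordiv num 10 = num / 10 :=
        PySem.Int.floordiv_eq_ediv_of_pos (by omega)
      rw [hdiv] at hrec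
      have hmod : PySem.Int.mod (PySem.Int.mod num 10) 2 = 0 ∨
                  PySem.Int.mod (PySem.Int.mod num 10) 2 = 1 := by
        rw [PySem.Int.mod_eq_emod_of_pos (a := num) (by omega),
            PySem.Int.mod_eq_emod_of_pos (by omega)]
        omega
      rw [pvLoop_alt, formar_par_aux]
      rcases hmod with he | ho
      · simp only [h0, dite_false, he]
        norm_num
        rw [ih _ _ _ hrec]; ring
      · simp only [h0, dite_false, ho]
        norm_num
        rw [ih _ _ _ hrec]

-- ===== VERDICT (by name: the statement is the Claim_ definition above) =====
theorem formar_par_aux_spec : Claim_equal_formar_par_aux := by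
  intro num _ _
  unfold Spec_formar_par_aux formar_par_aux_alt
  rw [pvLoop_eq num.toNat num 0 1 le_rfl]
  ring
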